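-- pv_equiv track=rewrite | github.com/etrinaa/PBIO |  2025py_s28612/s28612_2025.py | find_restriction_sites
-- ===== SOURCE A (Python) =====
-- RE_SITES = {
--     "EcoRI":  "GAATTC",
--     "BamHI":  "GGATCC",
--     "HindIII":"AAGCTT",
-- }
--
-- def find_restriction_sites(sequence, sites=RE_SITES):
--     hits = {}  # initialize result dictionary
--     for enzyme, motif in sites.items():  # loop over each enzyme and its motif
--         # find all starting positions where motif matches
--         positions = [i for i in range(len(sequence) - len(motif) + 1)
--                      if sequence[i:i+len(motif)] == motif]
--         if positions:  # if any matches found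
--             hits[enzyme] = positions
--     return hits  # return the dict of hits
-- ===== SOURCE B (Python) =====
-- RE_SITES = {
--     "EcoRI":  "GAATTC",
--     "BamHI":  "GGATCC",
--     "HindIII":"AAGCTT",
-- }
--
-- def find_restriction_sites(sequence, sites=RE_SITES):
--     hits = {}
--     for enzyme, motif in sites.items():
--         positions = []
--         start = 0
--         while True:
--             i = sequence.find(motif, start)
--             if i == -1:
--                 break
--             positions.append(i)
--             start = i + 1
--         if positions:
--             hits[enzyme] = positions
--     return hits
-- ===== Notes on version B (the rewrite author's own statement) =====
-- stated objective: faster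
-- what changed: Replaces A's Python-level scan that slices and compares the sequence at every index with a loop of C-level str.find calls that jump straight to the next occurrence of the motif.
import Mathlib
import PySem

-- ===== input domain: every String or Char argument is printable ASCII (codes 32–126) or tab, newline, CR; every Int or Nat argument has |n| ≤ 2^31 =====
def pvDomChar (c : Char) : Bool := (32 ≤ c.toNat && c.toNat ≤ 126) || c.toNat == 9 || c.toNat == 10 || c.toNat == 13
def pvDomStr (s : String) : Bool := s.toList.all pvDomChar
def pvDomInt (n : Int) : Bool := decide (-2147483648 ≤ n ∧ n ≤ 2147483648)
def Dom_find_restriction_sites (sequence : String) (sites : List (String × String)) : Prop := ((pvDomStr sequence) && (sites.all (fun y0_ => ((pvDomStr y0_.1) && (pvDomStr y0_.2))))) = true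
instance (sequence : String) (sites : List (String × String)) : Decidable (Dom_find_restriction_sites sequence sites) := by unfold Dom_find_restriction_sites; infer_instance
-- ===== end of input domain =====

-- B replaces A's per-index slice comparison with a repeated first-occurrence search
-- (sequence.find(motif, start)), collecting hits left to right; return value only.

-- ===== PORT A =====
-- A-side helper: the list comprehension computing all match positions for one motif
def pyMatchPositions (sequence motif : String) : List Int :=
  (PySem.List.pyRange 0 (PySem.Str.len sequence - PySem.Str.len motif + 1)).filter
    (fun i => PySem.List.slice sequence.toList (some i) (some (i + PySem.Str.len motif))
                == motif.toList)

def find_restriction_sites (sequence : String) (sites : List (String × String)) :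
    List (String × List Int) :=
  (sites.foldl (fun (hits : PySem.Dict String (List Int)) em =>
    let positions := pyMatchPositions sequence em.2
    if positions ≠ [] then hits.insert em.1 positions else hits) PySem.Dict.empty).items

-- ===== PORT B =====
-- B-side helper: the while-loop 'i = sequence.find(motif, start)'; fuel only makes the
-- recursion structural (start grows past the length after at most len+2 iterations)
def pvScan (s sub : List Char) (start : Nat) : Nat → List Int
  | 0 => []
  | fuel + 1 =>
    let i := PySem.Chars.findFrom s sub (start : Int)
    if i = -1 then [] else i :: pvScan s sub (i.toNat + 1) fuel

def altPositions (sequence motif : String) : List Int :=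
  pvScan sequence.toList motif.toList 0 (sequence.toList.length + 2)

def find_restriction_sites_alt (sequence : String) (sites : List (String × String)) :
    List (String × List Int) :=
  (sites.foldl (fun (hits : PySem.Dict String (List Int)) em =>
    let positions := altPositions sequence em.2
    if positions ≠ [] then hits.insert em.1 positions else hits) PySem.Dict.empty).items

-- ===== PRECONDITION & SPEC =====
def Spec_find_restriction_sites (sequence : String) (sites : List (String × String)) (out : List (String × List Int)) : Prop := out = find_restriction_sites_alt sequence sites
instance (sequence : String) (sites : List (String × String)) (out : List (String × List Int)) : Decidable (Spec_find_restriction_sites sequence sites out) := by unfold Spec_find_restriction_sites; infer_instance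

-- ===== CLAIM (what is proved, stated in full; the proofs are below) =====
def Claim_equal_find_restriction_sites : Prop := ∀ (sequence : String) (sites : List (String × String)), Dom_find_restriction_sites sequence sites → Spec_find_restriction_sites sequence sites (find_restriction_sites sequence sites)

-- ===== LEMMAS AND PROOFS =====

-- sequence.find(motif, start) is -1 once start is past the length (CPython's clamping rule)
lemma findFrom_past (s sub : List Char) (k : Nat) (h : s.length < k) :
    PySem.Chars.findFrom s sub (k : Int) = -1 := by
  simp only [PySem.Chars.findFrom]
  split_ifs <;> omega

-- splitting a filtered range at the first accepted index ≥ start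
lemma filter_range_split (K start iN : Nat) (p : Nat → Bool)
    (hiK : iN < K) (hst : start ≤ iN) (hp : p iN = true)
    (hmin : ∀ j, start ≤ j → j < iN → p j = false) :
    (List.range K).filter (fun j => decide (start ≤ j) && p j)
      = iN :: (List.range K).filter (fun j => decide (iN + 1 ≤ j) && p j) := by
  have hK : K = (iN + 1) + (K - (iN + 1)) := by omega
  rw [List.range_eq_range', hK,
      ← List.range'_append (s := 0) (m := iN + 1) (n := K - (iN + 1)) (step := 1)]
  have h1 : List.range' 0 (iN + 1) 1 = List.range' 0 iN 1 ++ [iN] := by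
    rw [← List.range'_append (s := 0) (m := iN) (n := 1) (step := 1)]
    simp
  rw [List.filter_append, List.filter_append, h1, List.filter_append, List.filter_append]
  have e1 : (List.range' 0 iN 1).filter (fun j => decide (start ≤ j) && p j) = [] := by
    rw [List.filter_eq_nil_iff]
    intro j hj
    have hj' : j < iN := by
      have := List.mem_range'_1.mp hj; omega
    by_cases hsj : start ≤ j
    · simp [hsj, hmin j hsj hj']
    · simp [hsj]
  have e2 : [iN].filter (fun j => decide (start ≤ j) && p j) = [iN] := by
    simp [hst, hp]
  have e3 : (List.range' 0 iN 1).filter (fun j => decide (iN + 1 ≤ j) && p j) = [] := by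
    rw [List.filter_eq_nil_iff]
    intro j hj
    have hj' : j < iN := by have := List.mem_range'_1.mp hj; omega
    simp [show ¬ (iN + 1 ≤ j) by omega]
  have e4 : [iN].filter (fun j => decide (iN + 1 ≤ j) && p j) = [] := by
    simp
  have e5 : (List.range' (0 + 1 * (iN + 1)) (K - (iN + 1)) 1).filter
        (fun j => decide (start ≤ j) && p j)
      = (List.range' (0 + 1 * (iN + 1)) (K - (iN + 1)) 1).filter
        (fun j => decide (iN + 1 ≤ j) && p j) := by
    apply List.filter_congr
    intro j hj
    have := List.mem_range'_1.mp hj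
    simp [show start ≤ j by omega, show iN + 1 ≤ j by omega]
  rw [e1, e2, e3, e4, e5]
  simp

-- the find-loop enumerates exactly the match positions ≥ start, in order
lemma pvScan_eq (s sub : List Char) :
    ∀ (fuel start : Nat), start ≤ s.length + 1 → s.length + 1 - start < fuel →
    pvScan s sub start fuel
      = ((List.range (s.length + 1 - sub.length)).filter
          (fun j => decide (start ≤ j) && decide (sub <+: s.drop j))).map
          (fun (j : Nat) => (j : Int)) := by
  intro fuel
  induction fuel with
  | zero => intro start h1 h2; omega
  | succ fuel ih =>
    intro start h1 h2
    by_cases hs : start ≤ s.length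
    · by_cases hneg : PySem.Chars.findFrom s sub (start : Int) = -1
      · have hnofind : ¬ sub <:+: s.drop start :=
          (PySem.Chars.findFrom_natCast_eq_neg_one_iff s sub start hs).mp hneg
        simp only [pvScan, hneg, if_pos]
        symm
        rw [List.eq_nil_iff_forall_not_mem]
        intro x hx
        rw [List.mem_map] at hx
        obtain ⟨j, hj, rfl⟩ := hx
        rw [List.mem_filter, Bool.and_eq_true, decide_eq_true_eq, decide_eq_true_eq] at hj
        obtain ⟨hjr, hsj, hpre⟩ := hj
        apply hnofind
        rw [← PySem.Chars.isIn_iff_infix, ← PySem.Chars.exists_prefix_drop_iff_isIn]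
        refine ⟨j - start, ?_⟩
        rw [List.drop_drop, show start + (j - start) = j by omega]
        exact hpre
      · obtain ⟨hle, hpre, hmin⟩ := PySem.Chars.findFrom_natCast_spec s sub start hs hneg
        have hub : PySem.Chars.findFrom s sub (start : Int) ≤ (s.length : Int) := by
          rw [PySem.Chars.findFrom_natCast s sub start hs]
          have hfl := PySem.Chars.find_le_length (s.drop start) sub
          rw [List.length_drop] at hfl
          split_ifs <;> [omega; omega]
        set i := PySem.Chars.findFrom s sub (start : Int) with hi
        have hnn : (0 : Int) ≤ i := le_trans (by exact_mod_cast Nat.zero_le start) hle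
        have hicast : ((i.toNat : Nat) : Int) = i := Int.toNat_of_nonneg hnn
        have hstle : start ≤ i.toNat := by
          have : (start : Int) ≤ (i.toNat : Int) := by rw [hicast]; exact hle
          exact_mod_cast this
        have hles : i.toNat ≤ s.length := by
          have : (i.toNat : Int) ≤ (s.length : Int) := by rw [hicast]; exact hub
          exact_mod_cast this
        have hlen := hpre.length_le
        rw [List.length_drop] at hlen
        have hiK : i.toNat < s.length + 1 - sub.length := by omega
        simp only [pvScan]
        rw [← hi, if_neg hneg]
        rw [ih (i.toNat + 1) (by omega) (by omega)]
        rw [filter_range_split (s.length + 1 - sub.length) start i.toNat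
              (fun j => decide (sub <+: s.drop j)) hiK hstle (by simp [hpre])
              (fun j h1 h2 => by simp [hmin j h1 h2])]
        simp [hicast]
    · have hpast : PySem.Chars.findFrom s sub (start : Int) = -1 :=
        findFrom_past s sub start (by omega)
      simp only [pvScan, hpast, if_pos]
      symm
      rw [List.eq_nil_iff_forall_not_mem]
      intro x hx
      rw [List.mem_map] at hx
      obtain ⟨j, hj, rfl⟩ := hx
      rw [List.mem_filter, Bool.and_eq_true, decide_eq_true_eq, decide_eq_true_eq] at hj
      have hj' : j < s.length + 1 - sub.length := List.mem_range.mp hj.1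
      omega

-- the comprehension in A enumerates the same match positions (from 0), in order
lemma pyMatchPositions_eq_range (s sub : List Char) :
    (PySem.List.pyRange 0 ((s.length : Int) - (sub.length : Int) + 1)).filter
        (fun i => PySem.List.slice s (some i) (some (i + (sub.length : Int))) == sub)
      = ((List.range (s.length + 1 - sub.length)).filter
          (fun j => decide (sub <+: s.drop j))).map (fun (j : Nat) => (j : Int)) := by
  by_cases hm : sub.length ≤ s.length + 1
  · have hcast : ((s.length : Int) - (sub.length : Int) + 1)
        = ((s.length + 1 - sub.length : Nat) : Int) := by omega
    rw [hcast, PySem.List.pyRange_zero_natCast, List.filter_map]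
    congr 1
    apply List.filter_congr
    intro j hj
    simp only [Function.comp_apply]
    rw [PySem.List.slice_natCast_add]
    rw [Bool.eq_iff_iff, beq_iff_eq, decide_eq_true_eq, List.prefix_iff_eq_take]
    exact eq_comm
  · have hempty : PySem.List.pyRange 0 ((s.length : Int) - (sub.length : Int) + 1) = [] := by
      rw [List.eq_nil_iff_forall_not_mem]
      intro i hi
      have := PySem.List.mem_pyRange_one.mp hi
      omega
    have hK : s.length + 1 - sub.length = 0 := by omega
    rw [hempty, hK]
    simp
lemma positions_eq (sequence motif : String) :
    pyMatchPositions sequence motif = altPositions sequence motif := by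
  unfold pyMatchPositions altPositions
  rw [pvScan_eq sequence.toList motif.toList (sequence.toList.length + 2) 0
        (by omega) (by omega)]
  simp only [PySem.Str.len_eq]
  rw [pyMatchPositions_eq_range]
  congr 1

-- ===== VERDICT (by name: the statement is the Claim_ definition above) =====
theorem find_restriction_sites_spec : Claim_equal_find_restriction_sites := by
  intro sequence sites _
  unfold Spec_find_restriction_sites find_restriction_sites find_restriction_sites_alt
  congr 1
  apply PySem.List.foldl_congr_mem
  intro acc x _
  simp only [positions_eq]
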